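-- pv_equiv track=rewrite | github.com/rosepad21/50_days_of_Python | day_18.py | add_reverse
-- ===== SOURCE A (Python) =====
-- def add_reverse(li_1, li_2):
--     li_3 = []
--     if len(li_1) == len(li_2):
--         for i in range(len(li_1)):
--             li_3.append(li_1[i]+li_2[i])
--     else:
--         return 'The list are not of equal lengths'
--     return li_3[::-1]
-- ===== SOURCE B (Python) =====
-- def add_reverse(li_1, li_2):
--     if len(li_1) != len(li_2):
--         return 'The list are not of equal lengths'
--     return _rev_sum(li_1, li_2)
--
--
-- def _rev_sum(a, b):
--     # divide and conquer: reversed elementwise sum of equal-length a, b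
--     n = len(a)
--     if n == 0:
--         return []
--     if n == 1:
--         return [a[0] + b[0]]
--     m = n // 2
--     return _rev_sum(a[m:], b[m:]) + _rev_sum(a[:m], b[:m])
-- ===== Notes on version B (the rewrite author's own statement) =====
-- stated objective: alternative
-- what changed: B replaces A's forward index loop plus [::-1] slice with a divide-and-conquer recursion that splits the lists in half and returns solve(right half) + solve(left half), producing the reversed sum list directly with no reverse step.
import Mathlib
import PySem

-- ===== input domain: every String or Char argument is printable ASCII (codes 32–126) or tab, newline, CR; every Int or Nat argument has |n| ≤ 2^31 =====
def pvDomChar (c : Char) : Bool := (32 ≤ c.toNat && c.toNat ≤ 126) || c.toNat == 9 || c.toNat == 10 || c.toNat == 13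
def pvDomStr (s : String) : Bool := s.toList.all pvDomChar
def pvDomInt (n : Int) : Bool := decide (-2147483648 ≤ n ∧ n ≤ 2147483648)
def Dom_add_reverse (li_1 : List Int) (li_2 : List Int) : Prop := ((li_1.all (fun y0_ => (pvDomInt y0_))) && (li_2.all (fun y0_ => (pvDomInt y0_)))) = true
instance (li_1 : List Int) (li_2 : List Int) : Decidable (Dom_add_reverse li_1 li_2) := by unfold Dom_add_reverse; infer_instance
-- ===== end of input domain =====

-- B replaces A's index loop + [::-1] with a divide-and-conquer recursion returning
-- solve(right half) ++ solve(left half); objective: alternative (same task, different algorithm).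
-- On unequal lengths A returns a string, not a list of ints, so Pre_ excludes that case.

-- ===== PORT A =====
def add_reverse (li_1 : List Int) (li_2 : List Int) : List Int :=
  if li_1.length = li_2.length then
    let li_3 : List Int :=
      (PySem.List.pyRange 0 li_1.length 1).foldl
        (fun acc i => acc ++ [PySem.List.pyGetD li_1 i 0 + PySem.List.pyGetD li_2 i 0]) []
    (PySem.List.slice? li_3 none none (-1)).getD []
  else []  -- Python returns the string 'The list are not of equal lengths' here; outside Pre_

-- ===== PORT B =====
-- _rev_sum from Source B; the slices a[m:], a[:m] with 0 ≤ m ≤ len(a) are exactly List.drop/List.take.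
def revSum (a : List Int) (b : List Int) : List Int :=
  if a.length = 0 then []
  else if a.length = 1 then [PySem.List.pyGetD a 0 0 + PySem.List.pyGetD b 0 0]
  else
    let m := a.length / 2
    revSum (a.drop m) (b.drop m) ++ revSum (a.take m) (b.take m)
termination_by a.length
decreasing_by
  · simp only [List.length_drop]; omega
  · simp only [List.length_take]; omega

def add_reverse_alt (li_1 : List Int) (li_2 : List Int) : List Int :=
  if li_1.length ≠ li_2.length then []  -- Python returns the error string here; outside Pre_
  else revSum li_1 li_2

-- ===== PRECONDITION & SPEC =====
-- Pre_ excludes unequal-length inputs, on which A returns a string rather than a list of ints.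
def Pre_add_reverse (li_1 : List Int) (li_2 : List Int) : Prop := li_1.length = li_2.length
instance (li_1 : List Int) (li_2 : List Int) : Decidable (Pre_add_reverse li_1 li_2) := by unfold Pre_add_reverse; infer_instance
def pvWitness_add_reverse : List Int × List Int := ([1, 2, 3], [4, 5, 6])

def Spec_add_reverse (li_1 : List Int) (li_2 : List Int) (out : List Int) : Prop := out = add_reverse_alt li_1 li_2
instance (li_1 : List Int) (li_2 : List Int) (out : List Int) : Decidable (Spec_add_reverse li_1 li_2 out) := by unfold Spec_add_reverse; infer_instance

-- ===== CLAIM =====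
def Claim_equal_add_reverse : Prop := ∀ (li_1 : List Int) (li_2 : List Int), Dom_add_reverse li_1 li_2 → Pre_add_reverse li_1 li_2 → Spec_add_reverse li_1 li_2 (add_reverse li_1 li_2)

-- ===== LEMMAS AND PROOFS =====

-- A's forward index loop builds exactly the elementwise-sum list zipWith (+) li_1 li_2.
theorem map_range_eq_zipWith (li_1 li_2 : List Int)
    (h : li_1.length = li_2.length) :
    (PySem.List.pyRange 0 li_1.length 1).map
        (fun i => PySem.List.pyGetD li_1 i 0 + PySem.List.pyGetD li_2 i 0)
      = List.zipWith (· + ·) li_1 li_2 := by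
  apply List.ext_getElem
  · simp [h]
  · intro n h1 h2
    simp only [List.getElem_map, List.getElem_zipWith]
    have hn : n < li_1.length := by simpa using h1
    have hn2 : n < li_2.length := by omega
    rw [PySem.List.getElem_pyRange_one]
    simp_all [PySem.List.pyGetD_natCast, List.getD]

-- The divide-and-conquer recursion computes the reversed elementwise sum.
theorem revSum_eq (a b : List Int) (h : a.length = b.length) :
    revSum a b = (List.zipWith (· + ·) a b).reverse := by
  induction a, b using revSum.induct with
  | case1 a b h0 =>
    rw [revSum]
    simp_all [List.length_eq_zero_iff.mp h0]
  | case2 a b h0 h1 =>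
    rw [revSum, if_neg h0, if_pos h1]
    obtain ⟨x, hx⟩ := List.length_eq_one_iff.mp h1
    obtain ⟨y, hy⟩ := List.length_eq_one_iff.mp (h ▸ h1)
    subst hx hy
    simp [PySem.List.pyGetD]
  | case3 a b h0 h1 m ih1 ih2 =>
    rw [revSum, if_neg h0, if_neg h1]
    show revSum (a.drop m) (b.drop m) ++ revSum (a.take m) (b.take m) = _
    rw [ih1 (by simp [h]), ih2 (by simp; omega)]
    rw [← List.reverse_append, ← List.take_zipWith, ← List.drop_zipWith,
      List.take_append_drop]

-- ===== VERDICT =====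
theorem add_reverse_spec : Claim_equal_add_reverse := by
  intro li_1 li_2 _ hpre
  unfold Spec_add_reverse add_reverse add_reverse_alt
  unfold Pre_add_reverse at hpre
  rw [if_pos hpre, if_neg (by simpa using hpre)]
  rw [PySem.List.foldl_append_singleton_eq_map]
  simp only [List.nil_append, PySem.List.slice?_none_none_neg_one, Option.getD_some]
  rw [map_range_eq_zipWith _ _ hpre, revSum_eq _ _ hpre]
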